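-- pv_equiv track=rewrite | github.com/Deferf/Summation-Transformer | train_strictish_sub300_from_scratch.py | _compute_column_targets
-- ===== SOURCE A (Python) =====
-- from typing import List, Tuple
--
-- def _compute_column_targets(a: int, b: int) -> Tuple[List[int], List[int], List[int], List[int]]:
--     a_digits = [int(ch) for ch in reversed(f"{a:010d}")]
--     b_digits = [int(ch) for ch in reversed(f"{b:010d}")]
--
--     d1_cols = a_digits + [0]
--     d2_cols = b_digits + [0]
--
--     carry_in_cols: List[int] = []
--     y_tokens_digits: List[int] = []
--     y_tokens_carry: List[int] = []
--
--     carry_in = 0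
--     for i in range(11):
--         carry_in_cols.append(carry_in)
--         s = d1_cols[i] + d2_cols[i] + carry_in
--         out_d = s % 10
--         carry_out = s // 10
--         y_tokens_digits.append(out_d)
--         y_tokens_carry.append(carry_out)
--         carry_in = carry_out
--
--     return d1_cols, d2_cols, carry_in_cols, [10 * c + d for d, c in zip(y_tokens_digits, y_tokens_carry)]
-- ===== SOURCE B (Python) =====
-- from typing import List, Tuple
--
-- def _compute_column_targets(a: int, b: int) -> Tuple[List[int], List[int], List[int], List[int]]:
--     # Closed-form column arithmetic: digit i of n is (n // 10**i) % 10, the carry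
--     # entering column i is (a % 10**i + b % 10**i) // 10**i, and the carry leaving
--     # it is the same expression at i+1; no sequential carry propagation is needed.
--     p = [10 ** i for i in range(12)]
--     d1_cols = [(a // p[i]) % 10 for i in range(11)]
--     d2_cols = [(b // p[i]) % 10 for i in range(11)]
--     total = a + b
--     carry_in_cols = [(a % p[i] + b % p[i]) // p[i] for i in range(11)]
--     tokens = [10 * ((a % p[i + 1] + b % p[i + 1]) // p[i + 1]) + (total // p[i]) % 10
--               for i in range(11)]
--     return d1_cols, d2_cols, carry_in_cols, tokens
-- ===== Notes on version B (the rewrite author's own statement) =====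
-- stated objective: alternative
-- what changed: Replaces A's string-formatting digit extraction and sequential carry-propagation loop by closed-form per-column arithmetic: digit i is (x // 10**i) % 10 and the carry entering column i is (a % 10**i + b % 10**i) // 10**i, so every column is computed independently of the others.
import Mathlib
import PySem

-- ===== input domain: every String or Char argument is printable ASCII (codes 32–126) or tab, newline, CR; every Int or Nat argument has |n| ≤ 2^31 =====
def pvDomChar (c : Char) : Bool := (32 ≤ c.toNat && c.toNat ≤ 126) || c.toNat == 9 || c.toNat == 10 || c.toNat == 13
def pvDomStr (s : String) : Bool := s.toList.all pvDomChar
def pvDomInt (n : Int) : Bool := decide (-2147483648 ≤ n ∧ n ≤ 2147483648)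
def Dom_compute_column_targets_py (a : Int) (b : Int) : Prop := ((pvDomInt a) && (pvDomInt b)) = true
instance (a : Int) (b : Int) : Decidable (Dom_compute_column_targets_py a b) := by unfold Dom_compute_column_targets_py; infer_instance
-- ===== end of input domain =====

-- B replaces A's sequential carry-propagation loop by closed-form column arithmetic
-- (carries and output digits computed independently per column from a, b and a+b).

-- ===== PORT A =====
-- f"{x:010d}" for x ≥ 0: str(x) left-padded with '0' to width 10 (x < 0 is outside Pre_);
-- int(ch) for a digit character ch is ch.toNat - 48 (exact: str(x) of x ≥ 0 is all digits).
def pvFmt010 (x : Int) : List Char :=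
  List.replicate (10 - (PySem.Int.toChars x).length) '0' ++ PySem.Int.toChars x

def pvRevDigits (x : Int) : List Int :=
  ((pvFmt010 x).reverse).map (fun ch => ((ch.toNat : Int) - 48))

-- the loop body; state = (carry_in_cols, y_tokens_digits, y_tokens_carry, carry_in);
-- d1_cols[i]/d2_cols[i] are always in range for i in range(11), so pyGetD is exact here
def pvStep (d1_cols d2_cols : List Int) (st : List Int × List Int × List Int × Int)
    (i : Int) : List Int × List Int × List Int × Int :=
  let s := PySem.List.pyGetD d1_cols i 0 + PySem.List.pyGetD d2_cols i 0 + st.2.2.2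
  let out_d := PySem.Int.mod s 10
  let carry_out := PySem.Int.floordiv s 10
  (st.1 ++ [st.2.2.2], st.2.1 ++ [out_d], st.2.2.1 ++ [carry_out], carry_out)

def compute_column_targets_py (a : Int) (b : Int) : List Int × List Int × List Int × List Int :=
  let a_digits := pvRevDigits a
  let b_digits := pvRevDigits b
  let d1_cols := a_digits ++ [0]
  let d2_cols := b_digits ++ [0]
  let st := (PySem.List.pyRange 0 11 1).foldl (pvStep d1_cols d2_cols) ([], [], [], 0)
  (d1_cols, d2_cols, st.1,
    (st.2.1.zip st.2.2.1).map (fun dc => 10 * dc.2 + dc.1))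

-- ===== PORT B =====
-- 10**i for i from range(12): the exponent i is ≥ 0, so the Int exponent becomes i.toNat
-- exactly; p[i] lookups are always in range, so pyGetD is exact here
def compute_column_targets_py_alt (a : Int) (b : Int) : List Int × List Int × List Int × List Int :=
  let p := (PySem.List.pyRange 0 12 1).map (fun i => (10 : Int) ^ i.toNat)
  let d1_cols := (PySem.List.pyRange 0 11 1).map
    (fun i => PySem.Int.mod (PySem.Int.floordiv a (PySem.List.pyGetD p i 0)) 10)
  let d2_cols := (PySem.List.pyRange 0 11 1).map
    (fun i => PySem.Int.mod (PySem.Int.floordiv b (PySem.List.pyGetD p i 0)) 10)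
  let total := a + b
  let carry_in_cols := (PySem.List.pyRange 0 11 1).map
    (fun i => PySem.Int.floordiv
      (PySem.Int.mod a (PySem.List.pyGetD p i 0) + PySem.Int.mod b (PySem.List.pyGetD p i 0))
      (PySem.List.pyGetD p i 0))
  let tokens := (PySem.List.pyRange 0 11 1).map
    (fun i => 10 * PySem.Int.floordiv
        (PySem.Int.mod a (PySem.List.pyGetD p (i + 1) 0) + PySem.Int.mod b (PySem.List.pyGetD p (i + 1) 0))
        (PySem.List.pyGetD p (i + 1) 0)
      + PySem.Int.mod (PySem.Int.floordiv total (PySem.List.pyGetD p i 0)) 10)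
  (d1_cols, d2_cols, carry_in_cols, tokens)

-- ===== PRECONDITION & SPEC =====
-- Pre_ excludes negative a or b, on which Python A raises ValueError (int('-') on the
-- sign character of the zero-padded decimal string).
def Pre_compute_column_targets_py (a : Int) (b : Int) : Prop := 0 ≤ a ∧ 0 ≤ b
instance (a : Int) (b : Int) : Decidable (Pre_compute_column_targets_py a b) := by
  unfold Pre_compute_column_targets_py; infer_instance

def pvWitness_compute_column_targets_py : Int × Int := (478, 35)

def Spec_compute_column_targets_py (a : Int) (b : Int)
    (out : List Int × List Int × List Int × List Int) : Prop :=
  out = compute_column_targets_py_alt a b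
instance (a : Int) (b : Int) (out : List Int × List Int × List Int × List Int) :
    Decidable (Spec_compute_column_targets_py a b out) := by
  unfold Spec_compute_column_targets_py; infer_instance

-- ===== CLAIM (what is proved, stated in full; the proofs are below) =====
def Claim_equal_compute_column_targets_py : Prop :=
  ∀ (a : Int) (b : Int), Dom_compute_column_targets_py a b →
    Pre_compute_column_targets_py a b →
    Spec_compute_column_targets_py a b (compute_column_targets_py a b)

-- ===== LEMMAS AND PROOFS =====

theorem pv_toDigitsCore (f : Nat) : ∀ (n : Nat) (acc : List Char), 0 < n → n < f →
    Nat.toDigitsCore 10 f n acc = ((Nat.digits 10 n).map Nat.digitChar).reverse ++ acc := by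
  induction f with
  | zero => intro n acc h1 h2; omega
  | succ f ih =>
    intro n acc h1 h2
    rw [Nat.digits_def' (by norm_num : 1 < 10) h1]
    simp only [Nat.toDigitsCore]
    by_cases h : n / 10 = 0
    · simp [h]
    · rw [if_neg h, ih (n / 10) _ (Nat.pos_of_ne_zero h) (by omega)]
      simp

theorem pv_toChars_eq (n : Nat) (h : 0 < n) :
    PySem.Int.toChars (n : Int) = ((Nat.digits 10 n).map Nat.digitChar).reverse := by
  simp only [PySem.Int.toChars]
  rw [if_neg (by omega)]
  have hn : (n : Int).toNat = n := by omega
  rw [hn]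
  simpa using pv_toDigitsCore (n + 1) n [] h (by omega)

theorem pv_digitChar_val (d : Nat) (h : d < 10) :
    ((Nat.digitChar d).toNat : Int) - 48 = (d : Int) := by
  interval_cases d <;> decide

-- padded little-endian digits = arithmetic digits (in Nat)
theorem pv_padded (k : Nat) : ∀ n : Nat, n < 10 ^ k →
    Nat.digits 10 n ++ List.replicate (k - (Nat.digits 10 n).length) 0
      = (List.range k).map (fun i => n / 10 ^ i % 10) := by
  induction k with
  | zero => intro n h; interval_cases n; simp
  | succ k ih =>
    intro n h
    rcases Nat.eq_zero_or_pos n with rfl | hn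
    · simp
    · rw [Nat.digits_def' (by norm_num : 1 < 10) hn, List.range_succ_eq_map]
      simp only [List.map_cons, List.length_cons, List.cons_append]
      have hlt : n / 10 < 10 ^ k := by
        rw [Nat.div_lt_iff_lt_mul (by norm_num)]
        calc n < 10 ^ (k+1) := h
        _ = 10 ^ k * 10 := by ring
      congr 1
      · simp
      · rw [show k + 1 - ((Nat.digits 10 (n/10)).length + 1) = k - (Nat.digits 10 (n/10)).length by omega]
        rw [ih (n / 10) hlt]
        rw [List.map_map]
        congr 1
        funext i
        simp only [Function.comp]
        rw [Nat.div_div_eq_div_mul]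
        congr 2
        omega

-- the reversed zero-padded digit string of ↑n (n ≤ 2^31), plus the extra 0 column,
-- is the arithmetic digit list over 11 columns
theorem pv_revDigits_eq (n : Nat) (h : n ≤ 2147483648) :
    pvRevDigits (n : Int) ++ [(0:Int)]
      = (List.range 11).map (fun i => ((n / 10 ^ i % 10 : Nat) : Int)) := by
  rcases Nat.eq_zero_or_pos n with rfl | hn
  · decide
  · have hlt : n < 10 ^ 10 := by omega
    have hlen : (Nat.digits 10 n).length ≤ 10 :=
      (Nat.digits_length_le_iff (by norm_num) n).mpr hlt
    have hchars := pv_toChars_eq n hn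
    unfold pvRevDigits pvFmt010
    rw [hchars, List.length_reverse, List.length_map, List.reverse_append,
      List.reverse_reverse, List.reverse_replicate, List.map_append, List.map_map,
      List.map_replicate]
    have hmap : (Nat.digits 10 n).map ((fun ch => ((ch.toNat : Int) - 48)) ∘ Nat.digitChar)
        = (Nat.digits 10 n).map (fun (d : Nat) => (d : Int)) := by
      apply List.map_congr_left
      intro d hd
      exact pv_digitChar_val d (Nat.digits_lt_base (by norm_num) hd)
    rw [hmap]
    have hrep : (List.replicate (10 - (Nat.digits 10 n).length) ((('0':Char).toNat : Int) - 48))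
        ++ [(0:Int)] = List.replicate (11 - (Nat.digits 10 n).length) (0:Int) := by
      have : (('0':Char).toNat : Int) - 48 = 0 := by decide
      rw [this, ← List.replicate_succ']
      congr 1
      omega
    rw [List.append_assoc, hrep]
    have := pv_padded 11 n (by omega)
    calc (Nat.digits 10 n).map (fun (d : Nat) => (d : Int)) ++ List.replicate (11 - (Nat.digits 10 n).length) (0:Int)
        = ((Nat.digits 10 n) ++ List.replicate (11 - (Nat.digits 10 n).length) 0).map (fun (d : Nat) => (d : Int)) := by
          rw [List.map_append, List.map_replicate]; norm_num
      _ = ((List.range 11).map (fun i => n / 10 ^ i % 10)).map (fun (d : Nat) => (d : Int)) := by rw [this]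
      _ = (List.range 11).map (fun i => ((n / 10 ^ i % 10 : Nat) : Int)) := by rw [List.map_map]; rfl

theorem pv_mod10 (x : Nat) : PySem.Int.mod (x : Int) 10 = ((x % 10 : Nat) : Int) := by
  exact_mod_cast PySem.Int.mod_natCast x 10

theorem pv_div10 (x : Nat) : PySem.Int.floordiv (x : Int) 10 = ((x / 10 : Nat) : Int) := by
  exact_mod_cast PySem.Int.floordiv_natCast x 10

-- the carry leaving a column, in closed form
theorem pv_carry_div (p n m : Nat) (hp : 0 < p) :
    (n / p % 10 + m / p % 10 + (n % p + m % p) / p) / 10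
      = (n % (p * 10) + m % (p * 10)) / (p * 10) := by
  rw [Nat.mod_mul (a := p) (b := 10) (x := n), Nat.mod_mul (a := p) (b := 10) (x := m),
    ← Nat.div_div_eq_div_mul]
  have key : (n % p + p * (n / p % 10) + (m % p + p * (m / p % 10))) / p
      = n / p % 10 + m / p % 10 + (n % p + m % p) / p := by
    rw [show n % p + p * (n / p % 10) + (m % p + p * (m / p % 10))
        = p * (n / p % 10 + m / p % 10) + (n % p + m % p) by rw [Nat.mul_add]; omega,
      Nat.mul_add_div hp]
  rw [key]

-- the output digit of a column, in closed form
theorem pv_carry_mod (p n m : Nat) (hp : 0 < p) :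
    (n / p % 10 + m / p % 10 + (n % p + m % p) / p) % 10 = (n + m) / p % 10 := by
  have key : (n + m) / p = n / p + m / p + (n % p + m % p) / p := by
    rw [show n + m = p * (n / p + m / p) + (n % p + m % p) by
        rw [Nat.mul_add]
        have a1 := Nat.div_add_mod n p
        have a2 := Nat.div_add_mod m p
        omega,
      Nat.mul_add_div hp]
  rw [key]
  omega

-- loop invariant: A's fold over the first k columns, in closed form
theorem pv_loop (n m : Nat) (d1 d2 : List Int)
    (h1 : ∀ i : Nat, i < 11 → PySem.List.pyGetD d1 (i : Int) 0 = ((n / 10 ^ i % 10 : Nat) : Int))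
    (h2 : ∀ i : Nat, i < 11 → PySem.List.pyGetD d2 (i : Int) 0 = ((m / 10 ^ i % 10 : Nat) : Int)) :
    ∀ k : Nat, k ≤ 11 →
      (PySem.List.pyRange 0 (k : Int) 1).foldl (pvStep d1 d2) ([], [], [], 0) =
        ((List.range k).map (fun i => (((n % 10 ^ i + m % 10 ^ i) / 10 ^ i : Nat) : Int)),
         (List.range k).map (fun i => (((n + m) / 10 ^ i % 10 : Nat) : Int)),
         (List.range k).map (fun i => (((n % 10 ^ (i+1) + m % 10 ^ (i+1)) / 10 ^ (i+1) : Nat) : Int)),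
         (((n % 10 ^ k + m % 10 ^ k) / 10 ^ k : Nat) : Int)) := by
  intro k
  induction k with
  | zero =>
    intro _
    simp [Nat.mod_one]
  | succ k ih =>
    intro hk
    have hcast : ((k + 1 : Nat) : Int) = (k : Int) + 1 := by push_cast; ring
    rw [hcast, PySem.List.pyRange_one_succ_right (by exact_mod_cast Nat.zero_le k),
      List.foldl_append, ih (by omega)]
    simp only [List.foldl_cons, List.foldl_nil, pvStep, h1 k (by omega), h2 k (by omega)]
    rw [show ((n / 10 ^ k % 10 : Nat) : Int) + ((m / 10 ^ k % 10 : Nat) : Int)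
          + (((n % 10 ^ k + m % 10 ^ k) / 10 ^ k : Nat) : Int)
        = ((n / 10 ^ k % 10 + m / 10 ^ k % 10 + (n % 10 ^ k + m % 10 ^ k) / 10 ^ k : Nat) : Int) by
      push_cast; ring]
    rw [pv_mod10, pv_div10, List.range_succ, List.map_append, List.map_append, List.map_append]
    have hpow : (10:Nat) ^ (k + 1) = 10 ^ k * 10 := by ring
    have hc := pv_carry_div (10 ^ k) n m (by positivity)
    have hd := pv_carry_mod (10 ^ k) n m (by positivity)
    simp only [List.map_cons, List.map_nil, Prod.mk.injEq]
    refine ⟨?_, ?_, ?_, ?_⟩ <;> first | trivial | rw [hd] | rw [hc, ← hpow]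

-- B's output, in the same closed form
theorem pv_alt_eq (n m : Nat) :
    compute_column_targets_py_alt (n : Int) (m : Int) =
      ((List.range 11).map (fun i => ((n / 10 ^ i % 10 : Nat) : Int)),
       (List.range 11).map (fun i => ((m / 10 ^ i % 10 : Nat) : Int)),
       (List.range 11).map (fun i => (((n % 10 ^ i + m % 10 ^ i) / 10 ^ i : Nat) : Int)),
       (List.range 11).map (fun i =>
         ((10 * ((n % 10 ^ (i+1) + m % 10 ^ (i+1)) / 10 ^ (i+1)) + (n + m) / 10 ^ i % 10 : Nat) : Int))) := by
  have hP : ∀ i : Nat, i < 12 →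
      PySem.List.pyGetD ((PySem.List.pyRange 0 12 1).map (fun j => (10:Int) ^ j.toNat)) (i : Int) 0
        = ((10 ^ i : Nat) : Int) := by decide
  have hR : PySem.List.pyRange 0 11 1 = (List.range 11).map (fun i : Nat => (i : Int)) := by decide
  simp only [compute_column_targets_py_alt, hR, List.map_map, Prod.mk.injEq]
  refine ⟨?_, ?_, ?_, ?_⟩ <;>
    (apply List.map_congr_left; intro i hi; have hi11 : i < 11 := List.mem_range.mp hi;
     simp only [Function.comp_apply])
  · rw [hP i (by omega), PySem.Int.floordiv_natCast, pv_mod10]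
  · rw [hP i (by omega), PySem.Int.floordiv_natCast, pv_mod10]
  · rw [hP i (by omega), PySem.Int.mod_natCast, PySem.Int.mod_natCast,
      ← Nat.cast_add, PySem.Int.floordiv_natCast]
  · rw [show ((i : Int) + 1) = ((i + 1 : Nat) : Int) by push_cast; ring,
      hP (i+1) (by omega), hP i (by omega), PySem.Int.mod_natCast, PySem.Int.mod_natCast,
      ← Nat.cast_add, PySem.Int.floordiv_natCast,
      show ((n : Int) + (m : Int)) = ((n + m : Nat) : Int) by push_cast; ring,
      PySem.Int.floordiv_natCast, pv_mod10]
    push_cast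
    ring

theorem pv_main (n m : Nat) (hn : n ≤ 2147483648) (hm : m ≤ 2147483648) :
    compute_column_targets_py (n : Int) (m : Int)
      = compute_column_targets_py_alt (n : Int) (m : Int) := by
  have hd1 := pv_revDigits_eq n hn
  have hd2 := pv_revDigits_eq m hm
  have h1 : ∀ i : Nat, i < 11 →
      PySem.List.pyGetD ((List.range 11).map (fun i => ((n / 10 ^ i % 10 : Nat) : Int))) (i : Int) 0
        = ((n / 10 ^ i % 10 : Nat) : Int) := by
    intro i hi
    rw [PySem.List.pyGetD_natCast, PySem.List.getD_map_range _ _ _ _ hi]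
  have h2 : ∀ i : Nat, i < 11 →
      PySem.List.pyGetD ((List.range 11).map (fun i => ((m / 10 ^ i % 10 : Nat) : Int))) (i : Int) 0
        = ((m / 10 ^ i % 10 : Nat) : Int) := by
    intro i hi
    rw [PySem.List.pyGetD_natCast, PySem.List.getD_map_range _ _ _ _ hi]
  have hloop := pv_loop n m _ _ h1 h2 11 le_rfl
  have h11 : ((11 : Nat) : Int) = (11 : Int) := by norm_num
  rw [h11] at hloop
  simp only [compute_column_targets_py, hd1, hd2]
  rw [hloop, pv_alt_eq]
  refine congrArg _ (congrArg _ (congrArg _ ?_))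
  rw [List.zip_map', List.map_map]
  apply List.map_congr_left
  intro i _
  simp only [Function.comp_apply]
  push_cast
  ring

-- ===== VERDICT (by name: the statement is the Claim_ definition above) =====
theorem compute_column_targets_py_spec : Claim_equal_compute_column_targets_py := by
  unfold Claim_equal_compute_column_targets_py
  intro a b hdom hpre
  unfold Spec_compute_column_targets_py
  obtain ⟨ha, hb⟩ := hpre
  obtain ⟨n, rfl⟩ : ∃ k : Nat, a = (k : Int) := ⟨a.toNat, by omega⟩
  obtain ⟨m, rfl⟩ : ∃ k : Nat, b = (k : Int) := ⟨b.toNat, by omega⟩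
  unfold Dom_compute_column_targets_py pvDomInt at hdom
  simp only [Bool.and_eq_true, decide_eq_true_eq] at hdom
  exact pv_main n m (by omega) (by omega)
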